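-- pv_equiv track=rewrite | github.com/sanjieyu/python_sample | worth_of_words.py | worth_of_words
-- ===== SOURCE A (Python) =====
-- VALUES = {'e': 1,  'a': 1, 'i': 1, 'o': 1, 'n': 1, 'r': 1,
--           't': 1,  'l': 1, 's': 1, 'u': 1, 'd': 2, 'g': 2,
--           'b': 3,  'c': 3, 'm': 3, 'p': 3, 'f': 4, 'h': 4,
--           'v': 4,  'w': 4, 'y': 4, 'k': 5, 'j': 8, 'x': 8,
--           'q': 10, 'z': 10}
--
-- def worth_of_words(words):
--     convert_num = []
--
--     for i in range(0,len(words)):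
--         total_value = 0
--         for j in range(0,len(words[i])):
--             convert_value = VALUES[words[i][j]]
--             total_value = convert_value + total_value
--         convert_num.append(total_value)
--     final_char = words[convert_num.index(max(convert_num))]
--     return final_char
-- ===== SOURCE B (Python) =====
-- VALUES = {'e': 1,  'a': 1, 'i': 1, 'o': 1, 'n': 1, 'r': 1,
--           't': 1,  'l': 1, 's': 1, 'u': 1, 'd': 2, 'g': 2,
--           'b': 3,  'c': 3, 'm': 3, 'p': 3, 'f': 4, 'h': 4,
--           'v': 4,  'w': 4, 'y': 4, 'k': 5, 'j': 8, 'x': 8,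
--           'q': 10, 'z': 10}
--
-- def worth_of_words(words):
--     # single pass keeping the current best word and its score;
--     # strict '>' keeps the FIRST maximal word, as A does
--     best = words[0]
--     best_score = 0
--     for ch in best:
--         best_score += VALUES[ch]
--     for w in words[1:]:
--         s = 0
--         for ch in w:
--             s += VALUES[ch]
--         if s > best_score:
--             best, best_score = w, s
--     return best
-- ===== Notes on version B (the rewrite author's own statement) =====
-- stated objective: simpler
-- what changed: Replaced A's three staged passes (build a parallel list of all scores, max() over that list, list.index() to find its position, re-index words) with one streaming pass that keeps only the current best word and its score; no score list is ever materialised.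
-- outside the precondition, e.g. on worth_of_words([]): A raises ValueError, B raises IndexError
import Mathlib
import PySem

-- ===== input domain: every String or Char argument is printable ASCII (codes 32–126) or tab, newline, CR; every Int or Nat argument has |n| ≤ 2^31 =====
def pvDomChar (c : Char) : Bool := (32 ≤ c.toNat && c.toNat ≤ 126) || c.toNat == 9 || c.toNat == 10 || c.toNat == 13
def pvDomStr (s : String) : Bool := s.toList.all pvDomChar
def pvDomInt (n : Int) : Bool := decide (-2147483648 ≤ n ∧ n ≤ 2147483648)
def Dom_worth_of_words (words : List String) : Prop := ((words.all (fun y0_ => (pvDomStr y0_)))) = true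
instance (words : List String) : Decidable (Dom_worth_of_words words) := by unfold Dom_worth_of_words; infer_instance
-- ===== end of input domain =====

-- B replaces A's staged passes (score list, max over it, index search, re-index) with one streaming
-- pass keeping only the current best word and its score; ties and raising inputs coincide with A's.

-- ===== PORT A =====

-- the module-level dict VALUES (insertion order, distinct keys)
def pvVALUES : PySem.Dict Char Int := PySem.Dict.mk
  [('e', 1), ('a', 1), ('i', 1), ('o', 1), ('n', 1), ('r', 1),
   ('t', 1), ('l', 1), ('s', 1), ('u', 1), ('d', 2), ('g', 2),
   ('b', 3), ('c', 3), ('m', 3), ('p', 3), ('f', 4), ('h', 4),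
   ('v', 4), ('w', 4), ('y', 4), ('k', 5), ('j', 8), ('x', 8),
   ('q', 10), ('z', 10)]

-- VALUES[c]: the KeyError case (character not a key) is excluded by Pre_, so the total getD form is exact.
def pvVal (c : Char) : Int := pvVALUES.getD c 0

-- A's inner loop: for j in range(0, len(words[i])): total_value = VALUES[words[i][j]] + total_value
-- (string indexing w[j] is ported through toList: Python's s[j] is the j-th character)
def pvInnerA (w : String) : Int :=
  (PySem.List.pyRange 0 (w.toList.length : Int) 1).foldl
    (fun tv j => pvVal (PySem.List.pyGetD w.toList j ' ') + tv) 0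

-- A's outer loop: for i in range(0, len(words)): convert_num.append(total_value)
def pvConvertNum (words : List String) : List Int :=
  (PySem.List.pyRange 0 (words.length : Int) 1).foldl
    (fun acc i => acc ++ [pvInnerA (PySem.List.pyGetD words i "")]) []

-- literal port of A; max([]) raises ValueError: excluded by Pre_, the 'none' branch is unreachable.
def worth_of_words (words : List String) : String :=
  let convert_num := pvConvertNum words
  match PySem.List.max? convert_num (fun y => y) with
  | some m =>
      PySem.List.pyGetD words (((PySem.List.index? convert_num m).getD 0 : Nat) : Int) ""
  | none => ""

-- ===== PORT B =====

-- B's inner loop: s = 0; for ch in w: s += VALUES[ch]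
def altScore (w : String) : Int := w.toList.foldl (fun a c => a + pvVal c) 0

-- literal port of B: the [] branch is Python's words[0] IndexError, excluded by Pre_;
-- 'best0 :: rest' makes rest exactly words[1:], and the fold carries (best, best_score).
def worth_of_words_alt (words : List String) : String :=
  match words with
  | [] => ""
  | best0 :: rest =>
      (rest.foldl
        (fun (st : String × Int) w =>
          let s := altScore w
          if s > st.2 then (w, s) else st)
        (best0, altScore best0)).1

-- ===== PRECONDITION & SPEC =====
-- Pre_ excludes exactly the inputs where the Python A raises: the empty list (ValueError from
-- max([])) and words containing a character outside 'a'..'z' (KeyError from VALUES[c]).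
-- B raises on exactly the same inputs (IndexError on [], KeyError otherwise).
def Pre_worth_of_words (words : List String) : Prop :=
  words ≠ [] ∧ words.all (fun w => w.toList.all (fun c => 'a' ≤ c && c ≤ 'z')) = true
instance (words : List String) : Decidable (Pre_worth_of_words words) := by
  unfold Pre_worth_of_words; infer_instance

def pvWitness_worth_of_words : List String := ["hello", "world", "zap"]

def Spec_worth_of_words (words : List String) (out : String) : Prop := out = worth_of_words_alt words
instance (words : List String) (out : String) : Decidable (Spec_worth_of_words words out) := by
  unfold Spec_worth_of_words; infer_instance

-- ===== CLAIM (what is proved, stated in full; the proofs are below) =====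
def Claim_equal_worth_of_words : Prop := ∀ (words : List String), Dom_worth_of_words words → Pre_worth_of_words words → Spec_worth_of_words words (worth_of_words words)

-- ===== LEMMAS AND PROOFS =====

-- the reference score: sum of the mapped values
def pvScore (w : String) : Int := (w.toList.map pvVal).sum

-- A's inner accumulation (convert_value + total_value) equals the sum of the mapped values
theorem pv_fold_eq_sum (l : List Char) (a : Int) :
    l.foldl (fun tv c => pvVal c + tv) a = a + (l.map pvVal).sum := by
  induction l generalizing a with
  | nil => simp
  | cons c t ih => simp [List.foldl, ih (pvVal c + a)]; ring

theorem pvInnerA_eq (w : String) : pvInnerA w = pvScore w := by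
  calc pvInnerA w
      = w.toList.foldl (fun tv c => pvVal c + tv) 0 :=
        PySem.List.foldl_pyRange_zero_pyGetD' w.toList ' ' (fun tv c => pvVal c + tv) 0
    _ = 0 + (w.toList.map pvVal).sum := pv_fold_eq_sum w.toList 0
    _ = pvScore w := by simp [pvScore]

theorem pvConvertNum_eq (words : List String) : pvConvertNum words = words.map pvScore := by
  calc pvConvertNum words
      = words.foldl (fun acc w => acc ++ [pvInnerA w]) [] :=
        PySem.List.foldl_pyRange_zero_pyGetD' words ""
          (fun acc w => acc ++ [pvInnerA w]) []
    _ = [] ++ words.map pvInnerA :=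
        PySem.List.foldl_append_singleton_eq_map pvInnerA words []
    _ = words.map pvScore := by simp [pvInnerA_eq]

-- B's inner accumulation (s += VALUES[ch]) equals the sum of the mapped values
theorem pv_fold_eq_sum' (l : List Char) (a : Int) :
    l.foldl (fun s c => s + pvVal c) a = a + (l.map pvVal).sum := by
  induction l generalizing a with
  | nil => simp
  | cons c t ih => simp [List.foldl, ih (a + pvVal c)]; ring

theorem altScore_eq (w : String) : altScore w = pvScore w := by
  simp [altScore, pvScore, pv_fold_eq_sum']

-- B's pair fold, projected to the word, is the selection fold (invariant: snd = score fst)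
theorem pv_pick_eq (t : List String) (x : String) :
    (t.foldl
      (fun (st : String × Int) w =>
        let s := altScore w
        if s > st.2 then (w, s) else st)
      (x, altScore x)).1
      = t.foldl (fun m y => if pvScore m < pvScore y then y else m) x := by
  induction t generalizing x with
  | nil => rfl
  | cons y t ih =>
      simp only [List.foldl_cons]
      by_cases h : pvScore x < pvScore y
      · rw [if_pos h, if_pos (by simpa [altScore_eq, gt_iff_lt] using h)]
        exact ih y
      · rw [if_neg h, if_neg (by simpa [altScore_eq, gt_iff_lt] using h)]
        exact ih x

-- core: indexing the words list at the first index of the maximal score (A's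
-- convert_num.index(max(convert_num))) selects exactly the first maximal word
theorem pv_argmax (s : String → Int) :
    ∀ (t : List String) (x : String),
      (x :: t).getD
          ((PySem.List.index? ((x :: t).map s) ((t.map s).foldl max (s x))).getD 0) ""
        = t.foldl (fun m y => if s m < s y then y else m) x := by
  intro t
  induction t with
  | nil =>
      intro x
      rw [List.map_cons, List.map_nil, List.foldl_nil, PySem.List.index?_cons_self]
      rfl
  | cons y t ih =>
      intro x
      simp only [List.map_cons, List.foldl_cons]
      by_cases h : s x < s y
      · -- the new head x is beaten by y: skip it on both sides
        rw [if_pos h, max_eq_right h.le]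
        have hxle : s y ≤ (t.map s).foldl max (s y) := (PySem.List.le_foldl_max (t.map s) (s y)).1
        have hne : s x ≠ (t.map s).foldl max (s y) := ne_of_lt (lt_of_lt_of_le h hxle)
        have hmem : (t.map s).foldl max (s y) ∈ s y :: t.map s := by
          rcases PySem.List.foldl_max_mem (t.map s) (s y) with hh | hh
          · rw [hh]; exact List.mem_cons_self
          · exact List.mem_cons_of_mem _ hh
        obtain ⟨k, hk⟩ := Option.isSome_iff_exists.mp
          ((PySem.List.index?_isSome_iff (s y :: t.map s) _).mpr hmem)
        rw [PySem.List.index?_cons_of_ne _ hne, hk]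
        have ihy := ih y
        rw [List.map_cons, hk] at ihy
        simpa using ihy
      · -- x survives y
        rw [if_neg h, max_eq_left (not_lt.mp h)]
        by_cases hx : s x = (t.map s).foldl max (s x)
        · -- the head already attains the maximum: index 0 on both sides
          have ihx := ih x
          rw [List.map_cons, ← hx, PySem.List.index?_cons_self] at ihx
          rw [← hx, PySem.List.index?_cons_self]
          simpa using ihx
        · have hxlt : s x < (t.map s).foldl max (s x) :=
            lt_of_le_of_ne (PySem.List.le_foldl_max (t.map s) (s x)).1 hx
          have hyne : s y ≠ (t.map s).foldl max (s x) :=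
            ne_of_lt (lt_of_le_of_lt (not_lt.mp h) hxlt)
          have hmem : (t.map s).foldl max (s x) ∈ t.map s := by
            rcases PySem.List.foldl_max_mem (t.map s) (s x) with hh | hh
            · exact absurd hh.symm hx
            · exact hh
          obtain ⟨k, hk⟩ := Option.isSome_iff_exists.mp
            ((PySem.List.index?_isSome_iff (t.map s) _).mpr hmem)
          have ihx := ih x
          rw [List.map_cons, PySem.List.index?_cons_of_ne _ hx, hk] at ihx
          rw [PySem.List.index?_cons_of_ne _ hx, PySem.List.index?_cons_of_ne _ hyne, hk]
          simpa using ihx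

-- ===== VERDICT (by name: the statement is the Claim_ definition above) =====
theorem worth_of_words_spec : Claim_equal_worth_of_words := by
  intro words _ hpre
  obtain ⟨hne, -⟩ := hpre
  obtain ⟨x, t, rfl⟩ := List.exists_cons_of_ne_nil hne
  unfold Spec_worth_of_words worth_of_words
  simp only [pvConvertNum_eq, List.map_cons, PySem.List.max?_id_cons,
    PySem.List.pyGetD_natCast]
  have h := pv_argmax pvScore t x
  rw [List.map_cons] at h
  rw [h, worth_of_words_alt, pv_pick_eq]
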